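-- pv_equiv track=rewrite | github.com/2725244134/Tnega | src/x_crawl/crawler.py | _extract_lang_token
-- ===== SOURCE A (Python) =====
-- def _extract_lang_token(query: str | None) -> str | None:
--     """Extract lang:xx token from a query string if present."""
--     if not query:
--         return None
--
--     parts = query.split()
--     for part in parts:
--         token = part.strip().lower()
--         if token.startswith("lang:") and len(token) > 5:
--             return token.split(":", 1)[1]
--     return None
-- ===== SOURCE B (Python) =====
-- def _extract_lang_token(query):
--     """Extract lang:xx token from a query string if present."""
--     if not query:
--         return None
--     s = query.lower()
--     i = s.find("lang:")
--     while i != -1: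
--         if (i == 0 or s[i - 1].isspace()) and i + 5 < len(s) and not s[i + 5].isspace():
--             end = i + 5
--             while end < len(s) and not s[end].isspace():
--                 end += 1
--             return s[i + 5:end]
--         i = s.find("lang:", i + 1)
--     return None
-- ===== Notes on version B (the rewrite author's own statement) =====
-- stated objective: alternative
-- what changed: Instead of splitting the query into a token list and testing each token's prefix, B lowercases the string once and drives the scan by substring search: it jumps between occurrences of the language-prefix pattern via str.find with a start offset and accepts the first occurrence that sits at a word boundary and is followed by a non-space character.
import Mathlib
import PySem

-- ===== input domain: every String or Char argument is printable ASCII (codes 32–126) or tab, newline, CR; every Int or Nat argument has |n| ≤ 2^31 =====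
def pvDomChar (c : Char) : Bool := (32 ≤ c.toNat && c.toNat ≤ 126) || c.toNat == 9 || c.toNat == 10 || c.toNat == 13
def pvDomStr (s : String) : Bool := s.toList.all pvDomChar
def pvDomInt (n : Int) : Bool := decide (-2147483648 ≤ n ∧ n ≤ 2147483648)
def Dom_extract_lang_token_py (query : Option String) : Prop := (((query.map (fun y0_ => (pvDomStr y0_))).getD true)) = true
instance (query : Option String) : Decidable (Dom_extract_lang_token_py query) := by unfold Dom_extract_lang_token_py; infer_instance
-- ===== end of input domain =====

-- B replaces A's tokenize-and-test-prefix loop by a substring-search scan: lowercase once, then jump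
-- between occurrences of the language prefix via str.find(start) with a word-boundary check; objective: alternative.

-- ===== PORT A =====
-- the 'for part in parts' loop of A
def pvALoop : List String → Option String
  | [] => none
  | p :: rest =>
    let token := PySem.Str.lower (PySem.Str.strip p)
    if PySem.Str.startswith token "lang:" && decide (5 < PySem.Str.len token) then
      -- token.split(":", 1)[1]; the branch guard guarantees the index exists, so pyGet? is some here
      PySem.List.pyGet? ((PySem.Str.splitMax? token ":" 1).getD []) 1
    else pvALoop rest

def extract_lang_token_py (query : Option String) : Option String :=
  match query with
  | none => none
  | some q => if q = "" then none else pvALoop (PySem.Str.split₀ q)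

-- ===== PORT B =====
-- the "lang:" pattern B searches for
def pvPat : List Char := ['l', 'a', 'n', 'g', ':']

-- B's inner while loop: 'while end < len(s) and not s[end].isspace(): end += 1'
def pvBEnd (s : List Char) (e : Nat) : Nat :=
  if h : e < s.length then
    if PySem.Chars.isspace s[e] then e else pvBEnd s (e + 1)
  else e
  termination_by s.length - e

-- fact about the library primitive, cited by pvBScan's decreasing_by: a start past len(s) finds nothing
theorem pv_findFrom_gt (s pat : List Char) (i : Nat) (h : s.length < i) :
    PySem.Chars.findFrom s pat (i : Int) none = -1 := by
  unfold PySem.Chars.findFrom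
  have h1 : ¬ ((i : Int) < 0) := by omega
  have h2 : (s.length : Int) < (i : Int) := by exact_mod_cast h
  simp [h1, h2]

-- facts cited by pvBScan's decreasing_by: a found index lies in [i, len) (pattern is non-empty)
theorem pv_find_facts (s : List Char) (i : Nat)
    (hf : PySem.Chars.findFrom s pvPat (i : Int) ≠ -1) :
    i ≤ s.length ∧ i ≤ (PySem.Chars.findFrom s pvPat (i : Int)).toNat ∧
      (PySem.Chars.findFrom s pvPat (i : Int)).toNat + 5 ≤ s.length := by
  by_cases hl : i ≤ s.length
  · obtain ⟨h1, h2, _⟩ := PySem.Chars.findFrom_natCast_spec s pvPat i hl hf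
    have hlen : pvPat.length ≤ (s.drop (PySem.Chars.findFrom s pvPat (i : Int)).toNat).length :=
      h2.length_le
    simp only [List.length_drop] at hlen
    have h5 : pvPat.length = 5 := by decide
    refine ⟨hl, by omega, by omega⟩
  · exact absurd (pv_findFrom_gt s pvPat i (by omega)) hf

-- B's outer while loop: i jumps between s.find("lang:", ·) hits
def pvBScan (s : List Char) (i : Nat) : Option String :=
  if hf : PySem.Chars.findFrom s pvPat (i : Int) = -1 then none
  else
    let k := (PySem.Chars.findFrom s pvPat (i : Int)).toNat
    if ((k == 0) || PySem.Chars.isspace (s.getD (k - 1) ' ')) && decide (k + 5 < s.length)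
        && !(PySem.Chars.isspace (s.getD (k + 5) ' ')) then
      -- s[i+5:end] with 0 ≤ i+5 ≤ end ≤ len(s): drop then take
      some (String.ofList ((s.drop (k + 5)).take (pvBEnd s (k + 5) - (k + 5))))
    else pvBScan s (k + 1)
  termination_by s.length + 1 - i
  decreasing_by
    have h := pv_find_facts s i hf
    omega

def extract_lang_token_py_alt (query : Option String) : Option String :=
  match query with
  | none => none
  | some q =>
    if q = "" then none
    else
      -- s = query.lower(); i = s.find("lang:"); while i != -1: …
      pvBScan (PySem.Chars.lower q.toList) 0

-- ===== PRECONDITION & SPEC =====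
def Spec_extract_lang_token_py (query : Option String) (out : Option String) : Prop := out = extract_lang_token_py_alt query
instance (query : Option String) (out : Option String) : Decidable (Spec_extract_lang_token_py query out) := by unfold Spec_extract_lang_token_py; infer_instance

-- ===== CLAIM (what is proved, stated in full; the proofs are below) =====
def Claim_equal_extract_lang_token_py : Prop := ∀ (query : Option String), Dom_extract_lang_token_py query → Spec_extract_lang_token_py query (extract_lang_token_py query)

-- ===== LEMMAS AND PROOFS =====

-- lowering an ASCII letter never creates or destroys whitespace
theorem pv_isspace_false_of (c : Char) (h1 : 65 ≤ c.toNat) (h2 : c.toNat ≤ 122) :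
    PySem.Chars.isspace c = false := by
  unfold PySem.Chars.isspace
  simp only [Bool.or_eq_false_iff, Bool.and_eq_false_iff, decide_eq_false_iff_not]
  omega

theorem pv_isspace_lowerChar (c : Char) :
    PySem.Chars.isspace (PySem.Chars.lowerChar c) = PySem.Chars.isspace c := by
  unfold PySem.Chars.lowerChar
  split
  · rename_i h
    unfold PySem.Chars.isupper at h
    simp only [Bool.and_eq_true, decide_eq_true_eq, Char.le_def] at h
    have hc : 65 ≤ c.toNat ∧ c.toNat ≤ 90 := by exact_mod_cast h
    have ht : (Char.ofNat (c.toNat + 32)).toNat = c.toNat + 32 := by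
      rw [Char.toNat_ofNat, if_pos (Or.inl (by omega))]
    rw [pv_isspace_false_of _ (by rw [ht]; omega) (by rw [ht]; omega),
        pv_isspace_false_of c (by omega) (by omega)]
  · rfl

-- token splitter used by the proof-side token scans (A's split, reshaped)
def pvBTok : List Char → List Char × List Char
  | [] => ([], [])
  | c :: cs =>
    if PySem.Chars.isspace c then ([], c :: cs)
    else ((c :: (pvBTok cs).1), (pvBTok cs).2)

theorem pvBTok_snd_len_le : ∀ l : List Char, (pvBTok l).2.length ≤ l.length := by
  intro l
  induction l with
  | nil => simp [pvBTok]
  | cons c cs ih =>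
    by_cases h : PySem.Chars.isspace c
    · simp [pvBTok, h]
    · simp [pvBTok, h]; omega

-- A's loop rephrased as a token scan over the raw characters (proof intermediate)
def pvTokLoop : List Char → Option String
  | [] => none
  | c :: cs =>
    if PySem.Chars.isspace c then pvTokLoop cs
    else
      let tok := c :: (pvBTok cs).1
      if decide (5 < tok.length) && decide (PySem.Chars.lower (tok.take 5) = "lang:".toList) then
        some (String.ofList (PySem.Chars.lower (tok.drop 5)))
      else pvTokLoop (pvBTok cs).2
  termination_by l => l.length
  decreasing_by
  all_goals simp
  have := pvBTok_snd_len_le cs; omega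

-- the same token scan over an already-lowered string (proof intermediate)
def pvCLoop : List Char → Option String
  | [] => none
  | c :: cs =>
    if PySem.Chars.isspace c then pvCLoop cs
    else
      let tok := c :: (pvBTok cs).1
      if decide (5 < tok.length) && decide (tok.take 5 = pvPat) then
        some (String.ofList (tok.drop 5))
      else pvCLoop (pvBTok cs).2
  termination_by l => l.length
  decreasing_by
  all_goals simp
  have := pvBTok_snd_len_le cs; omega

-- words of a char list, in the same recursion shape as pvTokLoop (proof-only helper)
def pvWords : List Char → List (List Char)
  | [] => []
  | c :: cs =>
    if PySem.Chars.isspace c then pvWords cs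
    else (c :: (pvBTok cs).1) :: pvWords (pvBTok cs).2
  termination_by l => l.length
  decreasing_by
  all_goals simp
  have := pvBTok_snd_len_le cs; omega

theorem pvBTok_eq (l : List Char) :
    pvBTok l = (l.takeWhile (fun c => !PySem.Chars.isspace c),
                l.dropWhile (fun c => !PySem.Chars.isspace c)) := by
  induction l with
  | nil => simp [pvBTok]
  | cons c cs ih =>
    by_cases h : PySem.Chars.isspace c
    · simp [pvBTok, h]
    · simp [pvBTok, h, ih]

-- split₀.go with an accumulator: the accumulator just prepends (reversed)
theorem pv_go_acc (s : List Char) : ∀ cur acc,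
    PySem.Chars.split₀.go s cur acc = acc.reverse ++ PySem.Chars.split₀.go s cur [] := by
  induction s with
  | nil => intro cur acc; simp [PySem.Chars.split₀.go]; split <;> simp
  | cons c rest ih =>
    intro cur acc
    by_cases h : PySem.Chars.isspace c
    · conv_lhs => rw [PySem.Chars.split₀.go]
      conv_rhs => rw [PySem.Chars.split₀.go]
      by_cases hc : cur.isEmpty
      · simp only [h, hc, ite_true]
        exact ih [] acc
      · simp only [h, hc, Bool.false_eq_true, ite_false, ite_true]
        rw [ih [] (cur.reverse :: acc), ih [] [cur.reverse]]
        simp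
    · conv_lhs => rw [PySem.Chars.split₀.go]
      conv_rhs => rw [PySem.Chars.split₀.go]
      simp only [h, Bool.false_eq_true, ite_false]
      exact ih _ _

-- split₀.go with empty accumulator computes pvWords (plus a pending partial token)
theorem pv_go_words (s : List Char) : ∀ cur : List Char,
    PySem.Chars.split₀.go s cur [] =
      if cur.isEmpty then pvWords s
      else (cur.reverse ++ (pvBTok s).1) :: pvWords (pvBTok s).2 := by
  induction s with
  | nil =>
    intro cur
    rw [PySem.Chars.split₀.go]
    by_cases hc : cur.isEmpty <;> simp [hc, pvWords, pvBTok]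
  | cons c rest ih =>
    intro cur
    by_cases h : PySem.Chars.isspace c
    · conv_lhs => rw [PySem.Chars.split₀.go]
      by_cases hc : cur.isEmpty
      · simp [h, hc, ih, pvWords]
      · simp only [h, hc, Bool.false_eq_true, ite_false, ite_true]
        rw [pv_go_acc, ih []]
        simp [pvWords, pvBTok, h, hc]
    · conv_lhs => rw [PySem.Chars.split₀.go]
      simp only [h, Bool.false_eq_true, ite_false]
      rw [ih (c :: cur)]
      by_cases hc : cur.isEmpty
      · simp [List.isEmpty_iff.mp hc, pvWords, pvBTok, h]
      · simp [hc, pvWords, pvBTok, h]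

theorem pv_split₀_eq_words (s : List Char) : PySem.Chars.split₀ s = pvWords s := by
  rw [PySem.Chars.split₀, pv_go_words]; simp

theorem pv_strip_of_nospace (l : List Char) (h : ∀ x ∈ l, PySem.Chars.isspace x = false) :
    PySem.Chars.strip l = l := by
  have hd : ∀ m : List Char, (∀ x ∈ m, PySem.Chars.isspace x = false) →
      m.dropWhile PySem.Chars.isspace = m := by
    intro m hm
    rw [List.dropWhile_eq_self_iff]
    intro hl
    simp [hm _ (List.getElem_mem hl)]
  rw [PySem.Chars.strip, PySem.Chars.lstrip, PySem.Chars.rstrip, hd l h]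
  rw [hd l.reverse (by intro x hx; exact h x (List.mem_reverse.mp hx))]
  simp

-- m = 0: splitOnMax.go returns immediately, independent of fuel
theorem pv_go_m0 (sep : List Char) (f : Nat) (l cur : List Char) (acc : List (List Char)) :
    PySem.Chars.splitOnMax.go sep f 0 l cur acc = ((cur.reverse ++ l) :: acc).reverse := by
  cases f with
  | zero => rw [PySem.Chars.splitOnMax.go]
  | succ f => cases l with
    | nil => rw [PySem.Chars.splitOnMax.go]; simp; omega
    | cons c rest => rw [PySem.Chars.splitOnMax.go]; simp

theorem pv_go_step (f m : Nat) (c : Char) (rest cur : List Char) (acc : List (List Char))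
    (hm : m ≠ 0) (hp : [':'].isPrefixOf (c :: rest) = false) :
    PySem.Chars.splitOnMax.go [':'] (f+1) m (c :: rest) cur acc
      = PySem.Chars.splitOnMax.go [':'] f m rest (c :: cur) acc := by
  conv_lhs => rw [PySem.Chars.splitOnMax.go]
  simp [hm, hp]

theorem pv_go_hit (f : Nat) (rest cur : List Char) (acc : List (List Char)) :
    PySem.Chars.splitOnMax.go [':'] (f+1) 1 (':' :: rest) cur acc
      = PySem.Chars.splitOnMax.go [':'] f 0 rest [] (cur.reverse :: acc) := by
  conv_lhs => rw [PySem.Chars.splitOnMax.go]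
  simp [List.isPrefixOf]

-- the A-side split of a lowered token that starts with "lang:"
theorem pv_split_token (r : List Char) :
    PySem.Chars.splitOnMax ('l'::'a'::'n'::'g'::':'::r) [':'] 1
      = [['l','a','n','g'], r] := by
  rw [PySem.Chars.splitOnMax]
  have h5 : ('l'::'a'::'n'::'g'::':'::r).length + 1 = (r.length + 5) + 1 := by simp
  simp only [show ¬ ((1:Int) < 0) by norm_num, if_false, Int.toNat_one, h5]
  rw [pv_go_step _ 1 'l' _ _ _ (by simp) (by simp [List.isPrefixOf])]
  rw [show r.length + 5 = (r.length + 4) + 1 by omega]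
  rw [pv_go_step _ 1 'a' _ _ _ (by simp) (by simp [List.isPrefixOf])]
  rw [show r.length + 4 = (r.length + 3) + 1 by omega]
  rw [pv_go_step _ 1 'n' _ _ _ (by simp) (by simp [List.isPrefixOf])]
  rw [show r.length + 3 = (r.length + 2) + 1 by omega]
  rw [pv_go_step _ 1 'g' _ _ _ (by simp) (by simp [List.isPrefixOf])]
  rw [show r.length + 2 = (r.length + 1) + 1 by omega]
  rw [pv_go_hit]
  rw [pv_go_m0]
  simp

-- per-token, condition: A's token test on a space-free token equals the take-5 test
theorem pv_cond_eq (t : List Char) (hns : ∀ x ∈ t, PySem.Chars.isspace x = false) :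
    (PySem.Str.startswith (PySem.Str.lower (PySem.Str.strip (String.ofList t))) "lang:"
      && decide (5 < PySem.Str.len (PySem.Str.lower (PySem.Str.strip (String.ofList t)))))
    = (decide (5 < t.length) && decide (PySem.Chars.lower (t.take 5) = "lang:".toList)) := by
  have hstrip : PySem.Chars.strip t = t := pv_strip_of_nospace t hns
  have hL : "lang:".toList = ['l','a','n','g',':'] := by decide
  simp only [PySem.Str.lower, PySem.Str.strip, PySem.Str.startswith, PySem.Str.len,
    String.toList_ofList, hstrip, hL]
  have hlen : (PySem.Chars.lower t).length = t.length := by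
    simp [PySem.Chars.lower]
  by_cases h5 : 5 < t.length
  · have hsw : PySem.Chars.startswith (PySem.Chars.lower t) ['l','a','n','g',':']
        = decide (PySem.Chars.lower (t.take 5) = ['l','a','n','g',':']) := by
      rcases Bool.eq_false_or_eq_true (PySem.Chars.startswith (PySem.Chars.lower t) ['l','a','n','g',':']) with hb | hb
      · rw [hb]; symm
        rw [decide_eq_true_iff]
        rw [PySem.Chars.startswith_iff, List.prefix_iff_eq_take, PySem.Chars.lower] at hb
        rw [PySem.Chars.lower, List.map_take]
        rw [show (5:Nat) = (['l','a','n','g',':'].length) from by decide]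
        exact hb.symm
      · rw [hb]; symm
        rw [decide_eq_false_iff_not]
        intro hEq
        have h2 : PySem.Chars.startswith (PySem.Chars.lower t) ['l','a','n','g',':'] = true := by
          rw [PySem.Chars.startswith_iff, List.prefix_iff_eq_take]
          show _ = (PySem.Chars.lower t).take (['l','a','n','g',':'].length)
          rw [show (['l','a','n','g',':'].length) = 5 by decide, PySem.Chars.lower, ← List.map_take,
            ← PySem.Chars.lower, hEq]
        rw [hb] at h2; exact absurd h2 (by simp)
    rw [hsw, hlen]
    simp [h5, show (5:Int) < (t.length:Int) from by exact_mod_cast h5, Bool.and_comm]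
  · have h6 : ¬ ((5:Int) < ((PySem.Chars.lower t).length : Int)) := by rw [hlen]; exact_mod_cast h5
    simp [h6, h5]

-- per-token, result: when the token matches, A's split(':',1)[1] is the lowered drop-5
theorem pv_res_eq (t : List Char) (hns : ∀ x ∈ t, PySem.Chars.isspace x = false)
    (hEq : PySem.Chars.lower (t.take 5) = "lang:".toList) :
    PySem.List.pyGet? ((PySem.Str.splitMax? (PySem.Str.lower (PySem.Str.strip (String.ofList t))) ":" 1).getD []) 1
      = some (String.ofList (PySem.Chars.lower (t.drop 5))) := by
  have hstrip : PySem.Chars.strip t = t := pv_strip_of_nospace t hns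
  rw [show ("lang:".toList) = ['l','a','n','g',':'] from by decide] at hEq
  have hlow : PySem.Chars.lower t = 'l'::'a'::'n'::'g'::':':: PySem.Chars.lower (t.drop 5) := by
    conv_lhs => rw [PySem.Chars.lower, ← List.take_append_drop 5 t, List.map_append]
    rw [show List.map PySem.Chars.lowerChar (t.take 5) = ['l','a','n','g',':'] from by
      simpa [PySem.Chars.lower] using hEq]
    simp [PySem.Chars.lower]
  rw [PySem.Str.lower, PySem.Str.strip, PySem.Str.splitMax?]
  simp only [String.toList_ofList]
  rw [hstrip, hlow]
  rw [show (":".toList) = [':'] from by decide]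
  rw [PySem.Chars.splitMax?]
  simp only [List.isEmpty_cons, Bool.false_eq_true, if_false, pv_split_token]
  simp [PySem.List.pyGet?, PySem.List.pyIdx?]

theorem pv_main (l : List Char) :
    pvALoop (List.map String.ofList (pvWords l)) = pvTokLoop l := by
  induction l using pvWords.induct with
  | case1 => simp [pvWords, pvALoop, pvTokLoop]
  | case2 c cs h ih => rw [pvWords, pvTokLoop]; simp [h, ih]
  | case3 c cs h ih =>
    have hns : ∀ x ∈ c :: (pvBTok cs).1, PySem.Chars.isspace x = false := by
      intro x hx
      rcases List.mem_cons.mp hx with rfl | hx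
      · simpa using h
      · rw [pvBTok_eq] at hx
        simpa using List.mem_takeWhile_imp hx
    rw [pvWords, pvTokLoop]
    simp only [h, Bool.false_eq_true, if_false, ite_false, List.map_cons, pvALoop]
    rw [pv_cond_eq _ hns]
    rcases Bool.eq_false_or_eq_true (decide (5 < (c :: (pvBTok cs).1).length)
        && decide (PySem.Chars.lower ((c :: (pvBTok cs).1).take 5) = "lang:".toList)) with hb | hb
    · rw [hb]
      simp only [if_true, ite_true]
      exact pv_res_eq _ hns (by simpa using (Bool.and_eq_true _ _ |>.mp hb).2)
    · rw [hb]
      simpa using ih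

-- lowering commutes with the token splitter
theorem pvBTok_map (cs : List Char) :
    pvBTok (List.map PySem.Chars.lowerChar cs)
      = (List.map PySem.Chars.lowerChar (pvBTok cs).1, List.map PySem.Chars.lowerChar (pvBTok cs).2) := by
  induction cs with
  | nil => simp [pvBTok]
  | cons c cs ih =>
    by_cases h : PySem.Chars.isspace c
    · simp [pvBTok, pv_isspace_lowerChar, h]
    · simp [pvBTok, pv_isspace_lowerChar, h, ih]

-- the raw token scan equals the lowered token scan
theorem pvTok_lower (l : List Char) : pvTokLoop l = pvCLoop (PySem.Chars.lower l) := by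
  induction l using pvWords.induct with
  | case1 => simp [pvTokLoop, pvCLoop, PySem.Chars.lower]
  | case2 c cs h ih =>
    rw [pvTokLoop, PySem.Chars.lower, List.map_cons, pvCLoop]
    simp [pv_isspace_lowerChar, h, ih, PySem.Chars.lower]
  | case3 c cs h ih =>
    rw [pvTokLoop, PySem.Chars.lower, List.map_cons, pvCLoop]
    simp only [pv_isspace_lowerChar, h, Bool.false_eq_true, if_false, ite_false, pvBTok_map]
    have htok : PySem.Chars.lowerChar c :: List.map PySem.Chars.lowerChar (pvBTok cs).1
        = List.map PySem.Chars.lowerChar (c :: (pvBTok cs).1) := by simp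
    rw [htok]
    have hlen : (List.map PySem.Chars.lowerChar (c :: (pvBTok cs).1)).length
        = (c :: (pvBTok cs).1).length := by simp
    have htake : (List.map PySem.Chars.lowerChar (c :: (pvBTok cs).1)).take 5
        = PySem.Chars.lower ((c :: (pvBTok cs).1).take 5) := by
      rw [PySem.Chars.lower, List.map_take]
    have hdrop : (List.map PySem.Chars.lowerChar (c :: (pvBTok cs).1)).drop 5
        = PySem.Chars.lower ((c :: (pvBTok cs).1).drop 5) := by
      rw [PySem.Chars.lower, List.map_drop]
    rw [hlen, htake, hdrop, show pvPat = "lang:".toList from by decide]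
    split
    · rfl
    · rw [ih, PySem.Chars.lower]

-- the condition under which B accepts position k, and the value it then returns
def pvValid (S : List Char) (k : Nat) : Bool :=
  pvPat.isPrefixOf (S.drop k) &&
    (((k == 0) || PySem.Chars.isspace (S.getD (k - 1) ' ')) && decide (k + 5 < S.length)
      && !(PySem.Chars.isspace (S.getD (k + 5) ' ')))

def pvRes (S : List Char) (k : Nat) : String :=
  String.ofList ((S.drop (k + 5)).takeWhile (fun c => !PySem.Chars.isspace c))

-- reference scan: first position ≥ i accepted by pvValid
def pvFirst (S : List Char) (i : Nat) : Option String :=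
  if h : i < S.length then
    if pvValid S i then some (pvRes S i) else pvFirst S (i + 1)
  else none
  termination_by S.length - i

theorem pvFirst_of_le (S : List Char) (i : Nat) (h : S.length ≤ i) : pvFirst S i = none := by
  rw [pvFirst, dif_neg (by omega)]

theorem pvFirst_skip (S : List Char) (i k : Nat) (hik : i ≤ k)
    (h : ∀ j, i ≤ j → j < k → pvValid S j = false) : pvFirst S i = pvFirst S k := by
  rcases Nat.eq_or_lt_of_le hik with rfl | hlt
  · rfl
  · by_cases hi : i < S.length
    · rw [pvFirst, dif_pos hi, if_neg (by simp [h i le_rfl hlt])]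
      exact pvFirst_skip S (i + 1) k hlt (fun j h1 h2 => h j (by omega) h2)
    · rw [pvFirst_of_le S i (by omega), pvFirst_of_le S k (by omega)]
  termination_by k - i

-- pvBEnd walks to the end of the non-space run
theorem pvBEnd_ge (S : List Char) (e : Nat) : e ≤ pvBEnd S e := by
  rw [pvBEnd]
  split
  · split
    · exact le_rfl
    · have := pvBEnd_ge S (e + 1); omega
  · exact le_rfl
  termination_by S.length - e

theorem pvBEnd_take (S : List Char) (e : Nat) :
    (S.drop e).take (pvBEnd S e - e) = (S.drop e).takeWhile (fun c => !PySem.Chars.isspace c) := by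
  by_cases h : e < S.length
  · rw [List.drop_eq_getElem_cons h, pvBEnd, dif_pos h]
    by_cases hs : PySem.Chars.isspace S[e]
    · simp [hs, List.takeWhile_cons]
    · have h1 := pvBEnd_ge S (e + 1)
      rw [if_neg hs, show pvBEnd S (e + 1) - e = (pvBEnd S (e + 1) - (e + 1)) + 1 by omega]
      rw [List.take_succ_cons, List.takeWhile_cons_of_pos (by simp [hs])]
      rw [pvBEnd_take S (e + 1)]
  · rw [List.drop_eq_nil_of_le (by omega)]
    simp
  termination_by S.length - e

-- the B scan computes the reference scan
theorem pvB_first (S : List Char) (i : Nat) : pvBScan S i = pvFirst S i := by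
  rw [pvBScan]
  by_cases hf : PySem.Chars.findFrom S pvPat (i : Int) = -1
  · rw [dif_pos hf]
    by_cases hl : i ≤ S.length
    · have hno := (PySem.Chars.findFrom_natCast_eq_neg_one_iff S pvPat i hl).mp hf
      symm
      refine Eq.trans (pvFirst_skip S i S.length hl ?_) (pvFirst_of_le S S.length le_rfl)
      intro j h1 h2
      unfold pvValid
      have hnp : pvPat.isPrefixOf (S.drop j) = false := by
        rw [Bool.eq_false_iff]
        intro hp
        have hd : S.drop j = (S.drop i).drop (j - i) := by
          rw [List.drop_drop]; congr 1; omega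
        refine hno ?_
        rw [hd] at hp
        exact (List.isPrefixOf_iff_prefix.mp hp).isInfix.trans
          (List.drop_suffix (j - i) (S.drop i)).isInfix
      simp [hnp]
    · rw [pvFirst_of_le S i (by omega)]
  · rw [dif_neg hf]
    obtain ⟨hil, hik, hk5⟩ := pv_find_facts S i hf
    set k := (PySem.Chars.findFrom S pvPat (i : Int)).toNat with hkdef
    obtain ⟨_, hpre, hmin⟩ := PySem.Chars.findFrom_natCast_spec S pvPat i hil hf
    show (if ((k == 0 || PySem.Chars.isspace (S.getD (k - 1) ' ')) && decide (k + 5 < S.length)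
        && !PySem.Chars.isspace (S.getD (k + 5) ' ')) = true then
        some (String.ofList (List.take (pvBEnd S (k + 5) - (k + 5)) (List.drop (k + 5) S)))
      else pvBScan S (k + 1)) = pvFirst S i
    have hskip : pvFirst S i = pvFirst S k := by
      refine pvFirst_skip S i k hik ?_
      intro j h1 h2
      unfold pvValid
      have hnp : pvPat.isPrefixOf (S.drop j) = false := by
        rw [Bool.eq_false_iff]
        exact fun hp => hmin j h1 h2 (List.isPrefixOf_iff_prefix.mp hp)
      simp [hnp]
    rw [hskip, pvFirst, dif_pos (by omega)]
    have hvp : pvPat.isPrefixOf (S.drop k) = true := List.isPrefixOf_iff_prefix.mpr hpre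
    unfold pvValid
    rw [hvp, Bool.true_and]
    split
    · rw [pvRes, pvBEnd_take]
    · exact pvB_first S (k + 1)
  termination_by S.length + 1 - i
  decreasing_by
    have h := pv_find_facts S i hf
    omega

-- the predicate is false exactly at the index where takeWhile stops
theorem pv_takeWhile_stop (p : Char → Bool) : ∀ (l : List Char),
    (l.takeWhile p).length < l.length → p (l.getD (l.takeWhile p).length ' ') = false := by
  intro l
  induction l with
  | nil => intro h; simp at h
  | cons c cs ih =>
    intro hl
    by_cases hc : p c
    · rw [List.takeWhile_cons_of_pos hc] at hl ⊢
      simp only [List.length_cons, List.getD_cons_succ]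
      exact ih (by simpa using hl)
    · rw [List.takeWhile_cons_of_neg hc]
      simpa using hc

-- dropping inside the takeWhile region commutes with takeWhile
theorem pv_takeWhile_drop (p : Char → Bool) : ∀ (n : Nat) (l : List Char),
    n ≤ (l.takeWhile p).length → (l.takeWhile p).drop n = (l.drop n).takeWhile p := by
  intro n
  induction n with
  | zero => simp
  | succ n ih =>
    intro l hn
    cases l with
    | nil => simp
    | cons c cs =>
      by_cases hc : p c
      · rw [List.takeWhile_cons_of_pos hc] at hn ⊢
        simpa using ih cs (by simpa using hn)
      · rw [List.takeWhile_cons_of_neg hc] at hn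
        simp at hn
-- a prefix made of satisfying chars is a prefix of the takeWhile
theorem pv_prefix_takeWhile (p : Char → Bool) : ∀ (u l : List Char), u <+: l →
    (∀ x ∈ u, p x = true) → u <+: l.takeWhile p := by
  intro u
  induction u with
  | nil => simp
  | cons c cs ih =>
    intro l hu hp
    obtain ⟨r, hr⟩ := hu
    subst hr
    rw [List.cons_append, List.takeWhile_cons_of_pos (hp c (by simp))]
    exact List.cons_prefix_cons.mpr ⟨rfl, ih (cs ++ r) ⟨r, rfl⟩ (fun x hx => hp x (by simp [hx]))⟩

-- all pattern characters are non-space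
theorem pv_pat_nospace : ∀ x ∈ pvPat, (!PySem.Chars.isspace x) = true := by
  intro x hx
  unfold pvPat at hx
  rcases List.mem_cons.mp hx with rfl | hx <;> try rfl
  rcases List.mem_cons.mp hx with rfl | hx <;> try rfl
  rcases List.mem_cons.mp hx with rfl | hx <;> try rfl
  rcases List.mem_cons.mp hx with rfl | hx <;> try rfl
  rcases List.mem_cons.mp hx with rfl | hx <;> first | rfl | simp at hx

-- the lowered token scan computes the reference scan (main invariant proof)
theorem pvC_first (S : List Char) (m : Nat)
    (hinv : ∀ k, k < m → pvValid S k = false)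
    (hbnd : m = 0 ∨ PySem.Chars.isspace (S.getD (m - 1) ' ') = true ∨
        ∀ h : m < S.length, PySem.Chars.isspace S[m] = true) :
    pvCLoop (S.drop m) = pvFirst S m := by
  by_cases hm : m < S.length
  · rw [List.drop_eq_getElem_cons hm, pvCLoop]
    by_cases hs : PySem.Chars.isspace S[m]
    · rw [if_pos hs]
      have hvm : pvValid S m = false := by
        unfold pvValid
        have hnp : pvPat.isPrefixOf (S.drop m) = false := by
          rw [Bool.eq_false_iff]
          intro hp
          have hpre := List.isPrefixOf_iff_prefix.mp hp
          rw [List.drop_eq_getElem_cons hm] at hpre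
          obtain ⟨r, hr⟩ := hpre
          simp only [pvPat, List.cons_append, List.cons.injEq] at hr
          rw [← hr.1] at hs
          exact absurd hs (by simp [show PySem.Chars.isspace 'l' = false from rfl])
        simp [hnp]
      rw [pvFirst, dif_pos hm, if_neg (by simp [hvm])]
      refine pvC_first S (m + 1) ?_ ?_
      · intro k hk
        rcases Nat.lt_or_ge k m with h1 | h1
        · exact hinv k h1
        · have : k = m := by omega
          subst this; exact hvm
      · refine Or.inr (Or.inl ?_)
        rw [show m + 1 - 1 = m by omega, List.getD_eq_getElem S ' ' hm]
        exact hs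
    · rw [if_neg hs]
      simp only [pvBTok_eq]
      -- the token at position m
      have hdm : S.drop m = S[m] :: S.drop (m + 1) := List.drop_eq_getElem_cons hm
      have htw : (S.drop m).takeWhile (fun c => !PySem.Chars.isspace c)
          = S[m] :: (S.drop (m + 1)).takeWhile (fun c => !PySem.Chars.isspace c) := by
        rw [hdm, List.takeWhile_cons_of_pos (by simp [hs])]
      set T := (S.drop m).takeWhile (fun c => !PySem.Chars.isspace c) with hTdef
      rw [← htw]
      have hTpre : T <+: S.drop m := List.takeWhile_prefix _
      have hTtake : T = (S.drop m).take T.length := List.prefix_iff_eq_take.mp hTpre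
      have hTlen : T.length ≤ S.length - m := by
        have := hTpre.length_le
        simpa using this
      have hT1 : 1 ≤ T.length := by rw [htw]; simp
      have helem : ∀ j, (hj : j < T.length) → S.getD (m + j) ' ' = T[j]'hj := by
        intro j hj
        have hjm : m + j < S.length := by omega
        rw [List.getD_eq_getElem S ' ' hjm]
        have h2 := List.getElem_of_eq hTtake hj
        rw [List.getElem_take, List.getElem_drop] at h2
        exact h2.symm
      have hPmem : ∀ x ∈ T, PySem.Chars.isspace x = false := by
        intro x hx
        rw [hTdef] at hx
        simpa using List.mem_takeWhile_imp hx
      have hPj : ∀ j, (hj : j < T.length) → PySem.Chars.isspace (T[j]'hj) = false :=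
        fun j hj => hPmem _ (List.getElem_mem hj)
      have hword : ((m == 0) || PySem.Chars.isspace (S.getD (m - 1) ' ')) = true := by
        rcases hbnd with h0 | hsp | hhd
        · simp [h0]
        · rw [hsp, Bool.or_true]
        · exact absurd (hhd hm) hs
      have hdw : (S.drop (m + 1)).dropWhile (fun c => !PySem.Chars.isspace c)
          = S.drop (m + T.length) := by
        have h1 : (S.drop m).dropWhile (fun c => !PySem.Chars.isspace c)
            = (S.drop (m + 1)).dropWhile (fun c => !PySem.Chars.isspace c) := by
          rw [hdm, List.dropWhile_cons_of_pos (by simp [hs])]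
        rw [← h1, ← List.drop_drop]
        conv_lhs => rw [← List.drop_left (l₁ := T)
          (l₂ := (S.drop m).dropWhile (fun c => !PySem.Chars.isspace c))]
        rw [hTdef, List.takeWhile_append_dropWhile]
      split
      · rename_i hcond
        simp only [Bool.and_eq_true, decide_eq_true_eq] at hcond
        obtain ⟨hlen5, htake5⟩ := hcond
        have hvalid : pvValid S m = true := by
          unfold pvValid
          have hp5 : pvPat.isPrefixOf (S.drop m) = true := by
            rw [List.isPrefixOf_iff_prefix, ← htake5]
            exact (List.take_prefix 5 T).trans hTpre
          have hm5 : m + 5 < S.length := by omega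
          have hns5 : PySem.Chars.isspace (S.getD (m + 5) ' ') = false := by
            rw [helem 5 hlen5]
            exact hPj 5 hlen5
          rw [hp5, hword, hns5, Bool.true_and, Bool.true_and, Bool.not_false, Bool.and_true]
          simpa using hm5
        rw [pvFirst, dif_pos hm, if_pos hvalid, pvRes]
        have hres : T.drop 5 = (S.drop (m + 5)).takeWhile (fun c => !PySem.Chars.isspace c) := by
          rw [hTdef, pv_takeWhile_drop _ 5 (S.drop m) (by rw [← hTdef]; omega), List.drop_drop]
        rw [hres]
      · rename_i hcond
        have hvm : pvValid S m = false := by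
          by_cases hp : pvPat.isPrefixOf (S.drop m)
          · have hpp : pvPat <+: T :=
              pv_prefix_takeWhile _ pvPat (S.drop m) (List.isPrefixOf_iff_prefix.mp hp)
                pv_pat_nospace
            have h5T : 5 ≤ T.length := by
              have := hpp.length_le
              simpa [show pvPat.length = 5 from rfl] using this
            have htk : T.take 5 = pvPat := by
              have h := List.prefix_iff_eq_take.mp hpp
              rw [show pvPat.length = 5 from rfl] at h
              exact h.symm
            have hT5 : T.length = 5 := by
              rcases Nat.lt_or_ge 5 T.length with h1 | h1
              · exact absurd (by simp [h1, htk]) hcond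
              · omega
            unfold pvValid
            by_cases hm5 : m + 5 < S.length
            · have hsp5 : PySem.Chars.isspace (S.getD (m + 5) ' ') = true := by
                have hstop := pv_takeWhile_stop (fun c => !PySem.Chars.isspace c) (S.drop m)
                  (by rw [← hTdef, hT5]; simp; omega)
                rw [← hTdef, hT5] at hstop
                have hg : (S.drop m).getD 5 ' ' = S.getD (m + 5) ' ' := by
                  rw [List.getD_eq_getElem _ ' ' (by simp; omega),
                    List.getD_eq_getElem S ' ' hm5, List.getElem_drop]
                rw [hg] at hstop
                simpa using hstop
              rw [hword, hsp5, Bool.true_and, Bool.not_true, Bool.and_false, Bool.and_false]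
            · have hdec : decide (m + 5 < S.length) = false := by simpa using hm5
              rw [hdec, Bool.and_false, Bool.false_and, Bool.and_false]
          · unfold pvValid
            have hfalse : pvPat.isPrefixOf (S.drop m) = false := Bool.eq_false_iff.mpr hp
            rw [hfalse, Bool.false_and]
        have hmid : ∀ k, m < k → k < m + T.length → pvValid S k = false := by
          intro k h1 h2
          have hk1 : k - 1 - m < T.length := by omega
          have hbd : PySem.Chars.isspace (S.getD (k - 1) ' ') = false := by
            rw [show k - 1 = m + (k - 1 - m) by omega, helem _ hk1]
            exact hPj _ hk1
          unfold pvValid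
          have hk0 : (k == 0) = false := by simp; omega
          rw [hk0, hbd, Bool.false_or, Bool.false_and, Bool.false_and, Bool.and_false]
        have hskip : pvFirst S m = pvFirst S (m + T.length) := by
          refine pvFirst_skip S m (m + T.length) (by omega) ?_
          intro j h1 h2
          rcases Nat.eq_or_lt_of_le h1 with rfl | h1
          · exact hvm
          · exact hmid j h1 h2
        rw [hdw, hskip]
        refine pvC_first S (m + T.length) ?_ ?_
        · intro k hk
          rcases Nat.lt_or_ge k m with h1 | h1
          · exact hinv k h1
          · rcases Nat.eq_or_lt_of_le h1 with rfl | h1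
            · exact hvm
            · exact hmid k h1 hk
        · refine Or.inr (Or.inr ?_)
          intro hlt
          have hstop := pv_takeWhile_stop (fun c => !PySem.Chars.isspace c) (S.drop m)
            (by rw [← hTdef]; simp; omega)
          rw [← hTdef] at hstop
          have hg : (S.drop m).getD T.length ' ' = S[m + T.length] := by
            rw [List.getD_eq_getElem _ ' ' (by simp; omega), List.getElem_drop]
          rw [hg] at hstop
          simpa using hstop
  · rw [List.drop_eq_nil_of_le (by omega), pvCLoop, pvFirst_of_le S m (by omega)]
  termination_by S.length - m
  decreasing_by
  · omega
  · simp only [hTdef] at hT1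
    omega

-- ===== VERDICT (by name: the statement is the Claim_ definition above) =====
theorem extract_lang_token_py_spec : Claim_equal_extract_lang_token_py := by
  intro query _
  unfold Spec_extract_lang_token_py extract_lang_token_py extract_lang_token_py_alt
  match query with
  | none => rfl
  | some q =>
    by_cases hq : q = ""
    · simp [hq]
    · simp only [hq, if_false]
      rw [PySem.Str.split₀, pv_split₀_eq_words, pv_main, pvTok_lower]
      have h0 := pvC_first (PySem.Chars.lower q.toList) 0 (by omega) (Or.inl rfl)
      rw [List.drop_zero] at h0
      rw [h0]
      exact (pvB_first (PySem.Chars.lower q.toList) 0).symm
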